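-- pv_equiv track=rewrite | github.com/peterbikes/100_Python_Projects | 100 Python Projects/Jacobsthal Numbers/jacobsthal_numbers.py | all_jacobs
-- ===== SOURCE A (Python) =====
-- def is_it_jacob(number):
--     if(number == 0 or number == 1):
--         return True
--     prev = 1
--     i = 3
--     swap = 0
--     while i <= number:
--         if(number == i):
--             return True
--         swap = i
--         i = i + (2*prev)
--         prev = swap
--     return False
--
-- def all_jacobs(number):
--     lst = []
--     while(number):
--         if(is_it_jacob(number)):
--             lst.append(number)
--         number -=1
--     lst.sort()
--     return lst
-- ===== SOURCE B (Python) =====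
-- def all_jacobs(number):
--     lst = []
--     a, b = 1, 3
--     while a <= number:
--         lst.append(a)
--         a, b = b, b + 2 * a
--     return lst
-- ===== Notes on version B (the rewrite author's own statement) =====
-- stated objective: faster
-- what changed: Instead of testing every positive integer up to number for Jacobsthal membership and then sorting, B generates the Jacobsthal sequence itself via its recurrence (a,b -> b,b+2a) in ascending order while a <= number; no per-candidate scan and no sort. Pre_ excludes negative numbers, on which A's truthiness-while loop never terminates.
import Mathlib
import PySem

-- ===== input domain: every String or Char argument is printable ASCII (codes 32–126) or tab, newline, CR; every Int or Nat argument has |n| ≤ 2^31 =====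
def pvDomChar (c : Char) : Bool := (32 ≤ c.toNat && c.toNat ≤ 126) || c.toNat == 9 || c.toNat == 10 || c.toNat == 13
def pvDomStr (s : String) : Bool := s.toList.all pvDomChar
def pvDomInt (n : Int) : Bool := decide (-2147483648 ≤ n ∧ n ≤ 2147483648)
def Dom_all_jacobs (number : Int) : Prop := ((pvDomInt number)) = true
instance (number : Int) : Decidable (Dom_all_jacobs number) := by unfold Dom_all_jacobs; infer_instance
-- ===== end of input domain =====

-- B replaces A's per-candidate Jacobsthal test over 1..number followed by a sort with a direct
-- ascending generation of the Jacobsthal sequence via its recurrence (objective: faster).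

-- ===== PORT A =====
-- while loop of is_it_jacob; fuel = number.toNat is a pure totalization guard (the loop's
-- index i increases by at least 2 each step, so the Python loop runs fewer iterations)
def jacobLoop : Nat → Int → Int → Int → Bool
  | 0, _, _, _ => false
  | fuel + 1, number, prev, i =>
    if i ≤ number then
      if number = i then true
      else jacobLoop fuel number i (i + 2 * prev)
    else false

def is_it_jacob (number : Int) : Bool :=
  if number = 0 ∨ number = 1 then true
  else jacobLoop number.toNat number 1 3

-- while(number) loop of all_jacobs; fuel = number.toNat (exact iteration count for number ≥ 0;
-- for number < 0 the Python loop diverges, excluded by Pre_)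
def aLoop : Nat → Int → List Int → List Int
  | 0, _, lst => lst
  | fuel + 1, number, lst =>
    if number ≠ 0 then
      aLoop fuel (number - 1) (if is_it_jacob number then lst ++ [number] else lst)
    else lst

def all_jacobs (number : Int) : List Int :=
  PySem.List.sorted (aLoop number.toNat number []) (fun x => x) false

-- ===== PORT B =====
-- while a ≤ number loop of Source B; fuel = number.toNat is a pure totalization guard
-- (a grows by at least 2 each iteration starting from 1)
def bLoop : Nat → Int → Int → Int → List Int → List Int
  | 0, _, _, _, lst => lst
  | fuel + 1, number, a, b, lst =>
    if a ≤ number then bLoop fuel number b (b + 2 * a) (lst ++ [a]) else lst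

def all_jacobs_alt (number : Int) : List Int :=
  bLoop number.toNat number 1 3 []

-- ===== PRECONDITION & SPEC =====
-- A's 'while(number)' loop never terminates for negative input, so Pre_ excludes number < 0.
def Pre_all_jacobs (number : Int) : Prop := 0 ≤ number
instance (number : Int) : Decidable (Pre_all_jacobs number) := by unfold Pre_all_jacobs; infer_instance
def pvWitness_all_jacobs : Int := (25)

def Spec_all_jacobs (number : Int) (out : List Int) : Prop := out = all_jacobs_alt number
instance (number : Int) (out : List Int) : Decidable (Spec_all_jacobs number out) := by unfold Spec_all_jacobs; infer_instance

-- ===== CLAIM (what is proved, stated in full; the proofs are below) =====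
def Claim_equal_all_jacobs : Prop := ∀ (number : Int), Dom_all_jacobs number → Pre_all_jacobs number → Spec_all_jacobs number (all_jacobs number)

-- ===== LEMMAS AND PROOFS =====

-- the Jacobsthal-like sequence 1, 3, 5, 11, 21, … both programs traverse
def jac : Nat → Int
  | 0 => 1
  | 1 => 3
  | k + 2 => jac (k + 1) + 2 * jac k

theorem jac_step (k : Nat) : jac (k + 1 + 1) = jac (k + 1) + 2 * jac k := rfl

theorem jac_pos_pair : ∀ k, 0 < jac k ∧ 0 < jac (k + 1) := by
  intro k
  induction k with
  | zero => exact ⟨by decide, by decide⟩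
  | succ k ih =>
    refine ⟨ih.2, ?_⟩
    have h := jac_step k
    have h1 := ih.1
    have h2 := ih.2
    omega

theorem jac_pos (k : Nat) : 0 < jac k := (jac_pos_pair k).1

theorem jac_lt_succ (k : Nat) : jac k < jac (k + 1) := by
  cases k with
  | zero => decide
  | succ k =>
    have h := jac_pos k
    have h2 := jac_step k
    omega

theorem jac_strictMono : StrictMono jac := strictMono_nat_of_lt_succ jac_lt_succ

theorem jac_mono {k m : Nat} (h : k ≤ m) : jac k ≤ jac m := jac_strictMono.monotone h

theorem jac_ge (k : Nat) : (k : Int) + 1 ≤ jac k := by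
  induction k with
  | zero => decide
  | succ k ih =>
    have h := jac_lt_succ k
    push_cast
    push_cast at ih
    omega

-- characterization of A's inner while loop
theorem jacobLoop_iff : ∀ (f k : Nat) (x : Int), x < jac (k + 1 + f) →
    (jacobLoop f x (jac k) (jac (k + 1)) = true ↔ ∃ m, k + 1 ≤ m ∧ x = jac m) := by
  intro f
  induction f with
  | zero =>
    intro k x hx
    simp only [Nat.add_zero] at hx
    simp only [jacobLoop, Bool.false_eq_true, false_iff]
    rintro ⟨m, hm, rfl⟩
    have := jac_mono hm
    omega
  | succ f ih =>
    intro k x hx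
    simp only [jacobLoop]
    by_cases h1 : jac (k + 1) ≤ x
    · rw [if_pos h1]
      by_cases h2 : x = jac (k + 1)
      · rw [if_pos h2]
        simp only [true_iff]
        exact ⟨k + 1, le_refl _, h2⟩
      · rw [if_neg h2, ← jac_step k]
        have hx' : x < jac (k + 1 + 1 + f) := by
          have he : k + 1 + (f + 1) = k + 1 + 1 + f := by omega
          rw [he] at hx; exact hx
        rw [ih (k + 1) x hx']
        constructor
        · rintro ⟨m, hm, rfl⟩; exact ⟨m, by omega, rfl⟩
        · rintro ⟨m, hm, rfl⟩
          refine ⟨m, ?_, rfl⟩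
          rcases Nat.lt_or_ge m (k + 2) with hlt | hge
          · exfalso
            have hmk : m = k + 1 := by omega
            exact h2 (by rw [hmk])
          · omega
    · rw [if_neg h1]
      simp only [Bool.false_eq_true, false_iff]
      rintro ⟨m, hm, rfl⟩
      have := jac_mono hm
      omega

theorem is_it_jacob_iff (x : Int) (hx : 1 ≤ x) :
    is_it_jacob x = true ↔ ∃ m, x = jac m := by
  unfold is_it_jacob
  by_cases h01 : x = 0 ∨ x = 1
  · rw [if_pos h01]
    simp only [true_iff]
    rcases h01 with h | h
    · omega
    · exact ⟨0, by rw [h]; rfl⟩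
  · rw [if_neg h01]
    have hx2 : 2 ≤ x := by omega
    have hfuel : x < jac (0 + 1 + x.toNat) := by
      have h2 : (x.toNat : Int) = x := Int.toNat_of_nonneg (by omega)
      have h1 := jac_ge (0 + 1 + x.toNat)
      have h3 : ((0 + 1 + x.toNat : Nat) : Int) = 1 + x := by push_cast; omega
      rw [h3] at h1
      omega
    have hkey := jacobLoop_iff x.toNat 0 x hfuel
    have hj0 : jac 0 = 1 := rfl
    have hj1 : jac (0 + 1) = 3 := rfl
    rw [hj0, hj1] at hkey
    rw [hkey]
    constructor
    · rintro ⟨m, _, rfl⟩; exact ⟨m, rfl⟩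
    · rintro ⟨m, rfl⟩
      refine ⟨m, ?_, rfl⟩
      cases m with
      | zero => exfalso; have : jac 0 = 1 := rfl; omega
      | succ m => omega

-- A's outer loop, restated as a structural recursion downward
def dlist : Nat → List Int
  | 0 => []
  | k + 1 => (if is_it_jacob ((k : Int) + 1) then [(k : Int) + 1] else []) ++ dlist k

theorem aLoop_eq : ∀ (k : Nat) (acc : List Int), aLoop k ((k : Nat) : Int) acc = acc ++ dlist k := by
  intro k
  induction k with
  | zero => intro acc; simp [aLoop, dlist]
  | succ k ih =>
    intro acc
    have hc : ((k + 1 : Nat) : Int) = (k : Int) + 1 := by push_cast; ring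
    simp only [aLoop, ne_eq]
    rw [hc]
    rw [if_pos (by omega : ¬((k : Int) + 1 = 0))]
    rw [show (k : Int) + 1 - 1 = ((k : Nat) : Int) from by ring]
    rw [ih]
    by_cases h : is_it_jacob ((k : Int) + 1) = true
    · simp [dlist, h]
    · simp [dlist, h]

theorem mem_dlist (k : Nat) (x : Int) :
    x ∈ dlist k ↔ 1 ≤ x ∧ x ≤ (k : Int) ∧ is_it_jacob x = true := by
  induction k with
  | zero =>
    simp only [dlist, List.not_mem_nil, false_iff]
    rintro ⟨h1, h2, _⟩
    simp only [Nat.cast_zero] at h2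
    omega
  | succ k ih =>
    simp only [dlist, List.mem_append]
    constructor
    · intro h
      rcases h with h | h
      · by_cases hj : is_it_jacob ((k : Int) + 1) = true
        · rw [if_pos hj] at h
          simp only [List.mem_singleton] at h
          subst h
          exact ⟨by omega, by push_cast; omega, hj⟩
        · rw [if_neg hj] at h
          simp at h
      · rcases ih.mp h with ⟨h1, h2, h3⟩
        exact ⟨h1, by push_cast; omega, h3⟩
    · rintro ⟨h1, h2, h3⟩
      by_cases hx : x = (k : Int) + 1
      · subst hx
        rw [if_pos h3]
        simp
      · right
        exact ih.mpr ⟨h1, by push_cast at h2 ⊢; omega, h3⟩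

theorem dlist_pairwise (k : Nat) : (dlist k).Pairwise (· > ·) := by
  induction k with
  | zero => simp [dlist]
  | succ k ih =>
    simp only [dlist]
    refine List.pairwise_append.mpr ⟨?_, ih, ?_⟩
    · split_ifs <;> simp
    · intro a ha b hb
      have hb' := (mem_dlist k b).mp hb
      split_ifs at ha with hj
      · simp only [List.mem_singleton] at ha
        subst ha
        omega
      · simp at ha

-- characterization of B's loop starting at a pair of consecutive sequence values
theorem mem_bLoop : ∀ (f k : Nat) (n : Int) (acc : List Int) (x : Int), n < jac (k + f) →
    (x ∈ bLoop f n (jac k) (jac (k + 1)) acc ↔ x ∈ acc ∨ ∃ m, k ≤ m ∧ x = jac m ∧ jac m ≤ n) := by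
  intro f
  induction f with
  | zero =>
    intro k n acc x hn
    simp only [Nat.add_zero] at hn
    simp only [bLoop]
    constructor
    · intro h; exact Or.inl h
    · rintro (h | ⟨m, hm, rfl, hle⟩)
      · exact h
      · have := jac_mono hm
        omega
  | succ f ih =>
    intro k n acc x hn
    simp only [bLoop]
    by_cases h1 : jac k ≤ n
    · rw [if_pos h1, ← jac_step k]
      have hn' : n < jac (k + 1 + f) := by
        have he : k + (f + 1) = k + 1 + f := by omega
        rw [he] at hn; exact hn
      rw [ih (k + 1) n (acc ++ [jac k]) x hn']
      simp only [List.mem_append, List.mem_singleton]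
      constructor
      · rintro ((h | h) | ⟨m, hm, rfl, hle⟩)
        · exact Or.inl h
        · exact Or.inr ⟨k, le_refl _, h, h ▸ h1⟩
        · exact Or.inr ⟨m, by omega, rfl, hle⟩
      · rintro (h | ⟨m, hm, rfl, hle⟩)
        · exact Or.inl (Or.inl h)
        · rcases Nat.eq_or_lt_of_le hm with heq | hlt
          · exact Or.inl (Or.inr (by rw [heq]))
          · exact Or.inr ⟨m, by omega, rfl, hle⟩
    · rw [if_neg h1]
      constructor
      · intro h; exact Or.inl h
      · rintro (h | ⟨m, hm, rfl, hle⟩)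
        · exact h
        · have := jac_mono hm
          omega

theorem bLoop_pairwise : ∀ (f k : Nat) (n : Int) (acc : List Int),
    acc.Pairwise (· < ·) → (∀ x ∈ acc, x < jac k) →
    (bLoop f n (jac k) (jac (k + 1)) acc).Pairwise (· < ·) := by
  intro f
  induction f with
  | zero => intro k n acc hp _; simpa [bLoop] using hp
  | succ f ih =>
    intro k n acc hp hlt
    simp only [bLoop]
    by_cases h1 : jac k ≤ n
    · rw [if_pos h1, ← jac_step k]
      apply ih (k + 1) n
      · refine List.pairwise_append.mpr ⟨hp, by simp, ?_⟩
        intro a ha b hb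
        simp only [List.mem_singleton] at hb
        subst hb
        exact hlt a ha
      · intro x hx
        simp only [List.mem_append, List.mem_singleton] at hx
        rcases hx with hx | hx
        · exact lt_trans (hlt x hx) (jac_lt_succ k)
        · rw [hx]; exact jac_lt_succ k
    · rw [if_neg h1]
      exact hp

-- ===== VERDICT (by name: the statement is the Claim_ definition above) =====
theorem all_jacobs_spec : Claim_equal_all_jacobs := by
  intro number _ hpre
  unfold Spec_all_jacobs
  have hN : ((number.toNat : Nat) : Int) = number := Int.toNat_of_nonneg hpre
  set N := number.toNat with hNdef
  -- the B side, rephrased through jac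
  have hB : all_jacobs_alt number = bLoop N number (jac 0) (jac (0 + 1)) [] := rfl
  have hfuelB : number < jac (0 + N) := by
    have h1 := jac_ge (0 + N)
    push_cast at h1
    omega
  have hBmem : ∀ x, x ∈ all_jacobs_alt number ↔ ∃ m, x = jac m ∧ jac m ≤ number := by
    intro x
    rw [hB, mem_bLoop N 0 number [] x hfuelB]
    simp only [List.not_mem_nil, false_or]
    constructor
    · rintro ⟨m, _, rfl, hle⟩; exact ⟨m, rfl, hle⟩
    · rintro ⟨m, rfl, hle⟩; exact ⟨m, Nat.zero_le m, rfl, hle⟩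
  have hBpair : (all_jacobs_alt number).Pairwise (· < ·) := by
    rw [hB]
    exact bLoop_pairwise N 0 number [] (by simp) (by simp)
  -- the A side: the unsorted list is dlist N
  have hA : all_jacobs number = PySem.List.sorted (dlist N) (fun x => x) false := by
    unfold all_jacobs
    congr 1
    calc aLoop number.toNat number [] = aLoop N ((N : Nat) : Int) [] := by rw [hN]
    _ = [] ++ dlist N := aLoop_eq N []
    _ = dlist N := by simp
  rw [hA]
  -- same membership, both nodup ⇒ permutation; B is strictly increasing ⇒ it is the sorted order
  have hmemiff : ∀ x, x ∈ all_jacobs_alt number ↔ x ∈ dlist N := by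
    intro x
    rw [hBmem x, mem_dlist N x, hN]
    constructor
    · rintro ⟨m, rfl, hle⟩
      have hp := jac_pos m
      exact ⟨by omega, hle, (is_it_jacob_iff (jac m) (by omega)).mpr ⟨m, rfl⟩⟩
    · rintro ⟨h1, h2, h3⟩
      rcases (is_it_jacob_iff x h1).mp h3 with ⟨m, rfl⟩
      exact ⟨m, rfl, h2⟩
  have hperm : (all_jacobs_alt number).Perm (dlist N) := by
    rw [List.perm_ext_iff_of_nodup hBpair.nodup (dlist_pairwise N).nodup]
    exact hmemiff
  exact PySem.List.sorted_eq_of_perm_of_pairwise_lt (dlist N) (all_jacobs_alt number) (fun x => x) hperm (by simpa using hBpair)
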